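-- pv_equiv track=rewrite | github.com/Naresh1401/DriftGuard | backend/api/routes/signals.py | _parse_email_headers
-- ===== SOURCE A (Python) =====
-- from typing import Any, Dict, List, Optional
--
-- def _parse_email_headers(raw: str) -> List[tuple]:
--     """Parse raw email header text into (name, value) pairs."""
--     headers = []
--     current_name = None
--     current_value = ""
--
--     for line in raw.splitlines():
--         if line and line[0] in (" ", "\t"):
--             # Continuation line
--             current_value += " " + line.strip()
--         else:
--             if current_name:
--                 headers.append((current_name, current_value))
--             if ":" in line:
--                 current_name, _, current_value = line.partition(":")
--                 current_name = current_name.strip()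
--                 current_value = current_value.strip()
--             else:
--                 current_name = None
--                 current_value = ""
--
--     if current_name:
--         headers.append((current_name, current_value))
--
--     return headers
-- ===== SOURCE B (Python) =====
-- from typing import List
--
--
-- def _parse_email_headers(raw: str) -> List[tuple]:
--     """Parse raw email header text into (name, value) pairs (two-pass block decomposition)."""
--     # Pass 1: segment lines into blocks (head line, continuation lines).
--     blocks = []
--     for line in raw.splitlines():
--         if line and line[0] in (" ", "\t"):
--             if blocks:
--                 blocks[-1][1].append(line)
--         else:
--             blocks.append((line, []))
--     # Pass 2: map each block to a header pair if its head line is a real header.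
--     headers = []
--     for head, conts in blocks:
--         name, sep, value_part = head.partition(":")
--         if sep:
--             name = name.strip()
--             if name:
--                 value = value_part.strip()
--                 for cont in conts:
--                     value += " " + cont.strip()
--                 headers.append((name, value))
--     return headers
-- ===== Notes on version B (the rewrite author's own statement) =====
-- stated objective: alternative
-- what changed: Replaces A's single stateful fold (current name/value carried across lines with flush-on-boundary) by a two-pass decomposition: first segment lines into (head, continuations) blocks, then map each block to a pair via partition-and-strip.
import Mathlib
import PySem

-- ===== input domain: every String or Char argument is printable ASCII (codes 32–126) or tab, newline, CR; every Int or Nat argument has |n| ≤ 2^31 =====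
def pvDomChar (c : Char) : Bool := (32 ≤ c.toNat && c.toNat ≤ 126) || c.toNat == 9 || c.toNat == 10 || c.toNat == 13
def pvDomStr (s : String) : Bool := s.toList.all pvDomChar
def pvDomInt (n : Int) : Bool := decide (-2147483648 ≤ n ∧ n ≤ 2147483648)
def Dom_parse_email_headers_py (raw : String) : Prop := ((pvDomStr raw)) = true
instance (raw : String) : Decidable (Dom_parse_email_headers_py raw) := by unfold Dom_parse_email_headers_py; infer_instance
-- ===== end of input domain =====

-- B replaces A's single stateful accumulation loop by a two-pass block decomposition
-- (segment lines into header blocks, then map blocks to pairs); same cost, different structure.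

-- ===== PORT A =====
-- `line and line[0] in (" ", "\t")`
def pvACont (l : List Char) : Bool :=
  match l with
  | [] => false
  | c :: _ => c == ' ' || c == '\t'

-- A's loop state: (headers, current_name (None ↦ none), current_value); strings as List Char.
-- `line.partition(":")` ported by hand as takeWhile/dropWhile at the first ':' (exact, since
-- the separator is one character and the branch is guarded by `":" in line`).
def pvAStep (st : List (String × String) × Option (List Char) × List Char) (l : List Char) :
    List (String × String) × Option (List Char) × List Char :=
  match st with
  | (hs, cn, cv) =>
    if pvACont l then
      (hs, cn, cv ++ ' ' :: PySem.Chars.strip l)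
    else
      -- `if current_name:` — Python truthiness: neither None nor the empty string
      let hs' := if (cn.getD []).isEmpty then hs else hs ++ [(String.ofList (cn.getD []), String.ofList cv)]
      if ':' ∈ l then
        (hs', some (PySem.Chars.strip (l.takeWhile (· ≠ ':'))),
          PySem.Chars.strip ((l.dropWhile (· ≠ ':')).tail))
      else
        (hs', none, [])

def parse_email_headers_py (raw : String) : List (String × String) :=
  match (PySem.Chars.splitlines raw.toList).foldl pvAStep ([], none, []) with
  | (hs, cn, cv) =>
    if (cn.getD []).isEmpty then hs else hs ++ [(String.ofList (cn.getD []), String.ofList cv)]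

-- ===== PORT B =====
def pvBCont (l : List Char) : Bool :=
  match l with
  | [] => false
  | c :: _ => c == ' ' || c == '\t'

-- `blocks[-1][1].append(line)` guarded by `if blocks:`
def pvAddLast (bs : List (List Char × List (List Char))) (l : List Char) :
    List (List Char × List (List Char)) :=
  match bs with
  | [] => []
  | [b] => [(b.1, b.2 ++ [l])]
  | b :: rest => b :: pvAddLast rest l

-- pass 1: segment the lines into blocks
def pvBStep (bs : List (List Char × List (List Char))) (l : List Char) :
    List (List Char × List (List Char)) :=
  if pvBCont l then pvAddLast bs l else bs ++ [(l, [])]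

-- pass 2 body: one block to zero or one header pair (partition ported as in port A)
def pvBEmitStep (acc : List (String × String)) (b : List Char × List (List Char)) :
    List (String × String) :=
  if ':' ∈ b.1 then
    let name := PySem.Chars.strip (b.1.takeWhile (· ≠ ':'))
    if name.isEmpty then acc
    else
      acc ++ [(String.ofList name,
        String.ofList (b.2.foldl (fun v c => v ++ ' ' :: PySem.Chars.strip c)
          (PySem.Chars.strip ((b.1.dropWhile (· ≠ ':')).tail))))]
  else acc

def parse_email_headers_py_alt (raw : String) : List (String × String) :=
  let blocks := (PySem.Chars.splitlines raw.toList).foldl pvBStep []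
  blocks.foldl pvBEmitStep []

-- ===== PRECONDITION & SPEC =====
def Spec_parse_email_headers_py (raw : String) (out : List (String × String)) : Prop := out = parse_email_headers_py_alt raw
instance (raw : String) (out : List (String × String)) : Decidable (Spec_parse_email_headers_py raw out) := by unfold Spec_parse_email_headers_py; infer_instance

-- ===== CLAIM (what is proved, stated in full; the proofs are below) =====
def Claim_equal_parse_email_headers_py : Prop := ∀ (raw : String), Dom_parse_email_headers_py raw → Spec_parse_email_headers_py raw (parse_email_headers_py raw)

-- ===== LEMMAS AND PROOFS =====

-- what one block contributes
def pvEmit (h : List Char) (cs : List (List Char)) : List (String × String) :=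
  if ':' ∈ h then
    let name := PySem.Chars.strip (h.takeWhile (· ≠ ':'))
    if name.isEmpty then []
    else
      [(String.ofList name,
        String.ofList (cs.foldl (fun v c => v ++ ' ' :: PySem.Chars.strip c)
          (PySem.Chars.strip ((h.dropWhile (· ≠ ':')).tail))))]
  else []

-- common reference function: the headers of a line list (leading continuations are skipped)
def pvSpecFn : List (List Char) → List (String × String)
  | [] => []
  | l :: ls =>
    if pvBCont l then pvSpecFn ls
    else pvEmit l (ls.takeWhile pvBCont) ++ pvSpecFn ls

-- A's pending pair, if truthy
def pvPend (cn : Option (List Char)) (cv : List Char) : List (String × String) :=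
  if (cn.getD []).isEmpty then [] else [(String.ofList (cn.getD []), String.ofList cv)]

def pvAFinal (st : List (String × String) × Option (List Char) × List Char) :
    List (String × String) :=
  match st with
  | (hs, cn, cv) =>
    if (cn.getD []).isEmpty then hs else hs ++ [(String.ofList (cn.getD []), String.ofList cv)]

lemma pvAFinal_eq (hs : List (String × String)) (cn : Option (List Char)) (cv : List Char) :
    pvAFinal (hs, cn, cv) = hs ++ pvPend cn cv := by
  simp only [pvAFinal, pvPend]; split <;> simp

lemma pvALoop (ls : List (List Char)) :
    ∀ (hs : List (String × String)) (cn : Option (List Char)) (cv : List Char),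
    pvAFinal (ls.foldl pvAStep (hs, cn, cv)) =
      hs ++ pvPend cn ((ls.takeWhile pvBCont).foldl
            (fun v c => v ++ ' ' :: PySem.Chars.strip c) cv)
         ++ pvSpecFn ls := by
  induction ls with
  | nil => intro hs cn cv; simp [pvAFinal_eq, pvSpecFn]
  | cons l ls ih =>
    intro hs cn cv
    by_cases hc : pvACont l = true
    · have hb : pvBCont l = true := hc
      simp only [List.foldl_cons, pvAStep, hc, if_true, List.takeWhile_cons, hb, pvSpecFn,
        List.foldl_cons]
      rw [ih]
    · have hb : pvBCont l = false := by simpa using hc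
      simp only [List.foldl_cons, pvAStep, hc, List.takeWhile_cons, hb, pvSpecFn,
        Bool.false_eq_true, if_neg (by simp : ¬ (False : Prop))]
      by_cases hcol : ':' ∈ l
      · rw [if_pos hcol, ih]
        have he : pvPend (some (PySem.Chars.strip (l.takeWhile (· ≠ ':'))))
            ((ls.takeWhile pvBCont).foldl (fun v c => v ++ ' ' :: PySem.Chars.strip c)
              (PySem.Chars.strip ((l.dropWhile (· ≠ ':')).tail)))
            = pvEmit l (ls.takeWhile pvBCont) := by
          simp [pvPend, pvEmit, hcol]
        rw [he]
        simp only [pvPend]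
        split <;> simp
      · rw [if_neg hcol, ih]
        have he : pvEmit l (ls.takeWhile pvBCont) = [] := by simp [pvEmit, hcol]
        rw [he]
        simp only [pvPend, List.foldl_nil, Option.getD_none, List.isEmpty_nil, if_true]
        split <;> simp

lemma pvAddLast_ne_nil (bs : List (List Char × List (List Char))) (l : List Char)
    (h : bs ≠ []) : pvAddLast bs l ≠ [] := by
  cases bs with
  | nil => exact absurd rfl h
  | cons b rest => cases rest <;> simp [pvAddLast]

lemma pvFoldB_cons (ls : List (List Char)) :
    ∀ (b : List Char × List (List Char)) (bs : List (List Char × List (List Char))),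
    bs ≠ [] → ls.foldl pvBStep (b :: bs) = b :: ls.foldl pvBStep bs := by
  induction ls with
  | nil => intro b bs _; rfl
  | cons l ls ih =>
    intro b bs hne
    by_cases hc : pvBCont l = true
    · have h1 : pvAddLast (b :: bs) l = b :: pvAddLast bs l := by
        cases bs with
        | nil => exact absurd rfl hne
        | cons b' rest => rfl
      simp only [List.foldl_cons, pvBStep, hc, if_true, h1]
      exact ih _ _ (pvAddLast_ne_nil _ _ hne)
    · simp only [List.foldl_cons, pvBStep, hc, Bool.false_eq_true, if_false, List.cons_append]
      exact ih _ _ (by simp)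

lemma pvFoldB_single (ls : List (List Char)) :
    ∀ (h : List Char) (cs : List (List Char)),
    ls.foldl pvBStep [(h, cs)] =
      (h, cs ++ ls.takeWhile pvBCont) :: ls.foldl pvBStep [] := by
  induction ls with
  | nil => intro h cs; simp
  | cons l ls ih =>
    intro h cs
    by_cases hc : pvBCont l = true
    · simp only [List.foldl_cons, pvBStep, hc, if_true, pvAddLast, List.takeWhile_cons]
      rw [ih]
      simp
    · simp only [List.foldl_cons, pvBStep, hc, Bool.false_eq_true, if_false,
        List.takeWhile_cons, List.nil_append, List.singleton_append]
      rw [pvFoldB_cons ls (h, cs) [(l, [])] (by simp)]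
      simp

lemma pvEmitStep_eq (acc : List (String × String)) (b : List Char × List (List Char)) :
    pvBEmitStep acc b = acc ++ pvEmit b.1 b.2 := by
  simp only [pvBEmitStep, pvEmit]
  split
  · split <;> simp
  · simp

lemma pvFoldEmit (bs : List (List Char × List (List Char))) :
    ∀ acc, bs.foldl pvBEmitStep acc = acc ++ bs.flatMap (fun b => pvEmit b.1 b.2) := by
  induction bs with
  | nil => intro acc; simp
  | cons b bs ih => intro acc; simp [pvEmitStep_eq, ih, List.append_assoc]

lemma pvBLoop (ls : List (List Char)) :
    (ls.foldl pvBStep []).flatMap (fun b => pvEmit b.1 b.2) = pvSpecFn ls := by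
  induction ls with
  | nil => simp [pvSpecFn]
  | cons l ls ih =>
    by_cases hc : pvBCont l = true
    · simp only [List.foldl_cons, pvBStep, hc, if_true, pvAddLast, pvSpecFn]
      exact ih
    · simp only [List.foldl_cons, pvBStep, hc, Bool.false_eq_true, if_false, List.nil_append,
        pvSpecFn, pvFoldB_single]
      simp only [List.flatMap_cons, ih]

-- ===== VERDICT (by name: the statement is the Claim_ definition above) =====
theorem parse_email_headers_py_spec : Claim_equal_parse_email_headers_py := by
  intro raw _
  unfold Spec_parse_email_headers_py parse_email_headers_py_alt
  rw [pvFoldEmit, pvBLoop]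
  have hA : parse_email_headers_py raw =
      pvAFinal ((PySem.Chars.splitlines raw.toList).foldl pvAStep ([], none, [])) := rfl
  rw [hA, pvALoop]
  simp [pvPend]
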